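-- pv_equiv track=rewrite | github.com/mackelab/mackelab-toolbox | mackelab_toolbox/smttk.py | join_keys
-- ===== SOURCE A (Python) =====
-- def join_keys(key1, key2):
--     if all(key in ('', None) for key in (key1, key2)):
--         return None
--     elif key1 in ('', None):
--         return key2
--     elif key2 in ('', None):
--         return key1
--     else:
--         return '.'.join((key1, key2))
-- ===== SOURCE B (Python) =====
-- def join_keys(key1, key2):
--     joined = None
--     for k in (key1, key2):
--         if k in ('', None):
--             continue
--         joined = k if joined is None else joined + '.' + k
--     return joined
-- ===== Notes on version B (the rewrite author's own statement) =====
-- stated objective: simpler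
-- what changed: Replaces A's four-way branch cascade with a single pass over the two keys accumulating the joined string (skip empties; start with the first survivor, then append '.'+key), so no case counting or join call is needed.
import Mathlib
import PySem

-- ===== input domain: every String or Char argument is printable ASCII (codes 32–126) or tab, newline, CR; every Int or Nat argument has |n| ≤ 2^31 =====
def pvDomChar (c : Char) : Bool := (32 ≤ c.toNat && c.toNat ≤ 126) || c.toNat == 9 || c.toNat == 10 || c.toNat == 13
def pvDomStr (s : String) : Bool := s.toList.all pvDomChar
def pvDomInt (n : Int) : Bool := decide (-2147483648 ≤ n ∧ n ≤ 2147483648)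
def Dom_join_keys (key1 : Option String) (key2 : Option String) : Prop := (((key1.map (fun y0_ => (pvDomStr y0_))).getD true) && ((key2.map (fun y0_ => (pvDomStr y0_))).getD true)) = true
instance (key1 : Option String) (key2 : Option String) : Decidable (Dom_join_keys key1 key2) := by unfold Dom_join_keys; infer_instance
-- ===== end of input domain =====

-- B replaces A's branch cascade with a single accumulator pass over the two keys (simpler decomposition, same cost).


-- ===== PORT A =====
def pyEmptyKey (k : Option String) : Bool := k == some "" || k == none

def join_keys (key1 : Option String) (key2 : Option String) : Option String :=
  if [key1, key2].all (fun key => pyEmptyKey key) then none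
  else if pyEmptyKey key1 then key2
  else if pyEmptyKey key2 then key1
  else some (PySem.Str.join "." [key1.getD "", key2.getD ""])

-- ===== PORT B =====
def join_keys_alt (key1 : Option String) (key2 : Option String) : Option String :=
  [key1, key2].foldl
    (fun joined k =>
      if k == some "" || k == none then joined
      else match joined with
        | none => k
        | some a => some (a ++ "." ++ k.getD ""))
    none

-- ===== PRECONDITION & SPEC =====
def Spec_join_keys (key1 : Option String) (key2 : Option String) (out : Option String) : Prop := out = join_keys_alt key1 key2
instance (key1 : Option String) (key2 : Option String) (out : Option String) : Decidable (Spec_join_keys key1 key2 out) := by unfold Spec_join_keys; infer_instance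

-- ===== CLAIM (what is proved, stated in full; the proofs are below) =====
def Claim_equal_join_keys : Prop := ∀ (key1 : Option String) (key2 : Option String), Dom_join_keys key1 key2 → Spec_join_keys key1 key2 (join_keys key1 key2)

-- ===== LEMMAS AND PROOFS =====
theorem pysem_join_two (a b : String) : PySem.Str.join "." [a, b] = a ++ "." ++ b := by
  apply String.ext
  simp [PySem.Str.join, PySem.Chars.join, List.intercalate]

-- ===== VERDICT (by name: the statement is the Claim_ definition above) =====
theorem join_keys_spec : Claim_equal_join_keys := by
  intro key1 key2 _
  unfold Spec_join_keys join_keys join_keys_alt pyEmptyKey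
  rcases key1 with _ | s1 <;> rcases key2 with _ | s2
  · rfl
  · by_cases h2 : s2 = "" <;> simp [h2]
  · by_cases h1 : s1 = "" <;> simp [h1]
  · by_cases h1 : s1 = "" <;> by_cases h2 : s2 = "" <;>
      simp [h1, h2, pysem_join_two]
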